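-- pv_equiv track=rewrite | github.com/Mika-Rsbg/Budget-Planner | src/utils/utils_mt940_loader.py | split_toblocks_mt940
-- ===== SOURCE A (Python) =====
-- def split_toblocks_mt940(file_content):
--     """
--     Split the file content into blocks based on the ":" character at the
--     beginning of the line.
--
--     Args:
--         file_content (str): The content of the file.
--
--     Returns:
--         list: A list of blocks.
--     """
--     # Split nach Zeilenumbruch
--     lines = file_content.split('\n')
--     blocks = []
--     current_block = []
--
--     for line in lines:
--         if line.startswith(':'):
--             # Wenn bereits ein Block gespeichert ist, füge ihn hinzu
--             if current_block:
--                 blocks.append(''.join(current_block))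
--             # Starte einen neuen Block mit der Zeile, die mit ":" beginnt
--             current_block = [line]
--         elif line.strip():  # Wenn die Zeile nicht leer ist (nur Leerzeichen)
--             current_block.append(line)
--
--     # Füge den letzten Block hinzu
--     if current_block:
--         blocks.append(''.join(current_block))
--     return blocks
-- ===== SOURCE B (Python) =====
-- def split_toblocks_mt940(file_content):
--     """Segment-slicing rewrite: find maximal segments starting at each ':'-line
--     (plus the leading segment), filter blank lines per segment, join each."""
--     lines = file_content.split('\n')
--     n = len(lines)
--     blocks = []
--     i = 0
--     while i < n:
--         j = i + 1
--         while j < n and not lines[j].startswith(':'):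
--             j += 1
--         kept = [l for l in lines[i:j] if l.startswith(':') or l.strip()]
--         if kept:
--             blocks.append(''.join(kept))
--         i = j
--     return blocks
-- ===== Notes on version B (the rewrite author's own statement) =====
-- stated objective: alternative
-- what changed: A's single pass with a mutable current-block accumulator and end-of-loop flush is replaced by a segment scan: an outer loop finds each maximal segment starting at a ':'-line (plus the leading segment) via an inner scan, then filters blank lines in that slice and joins it, emitting a block iff anything was kept.
import Mathlib
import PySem

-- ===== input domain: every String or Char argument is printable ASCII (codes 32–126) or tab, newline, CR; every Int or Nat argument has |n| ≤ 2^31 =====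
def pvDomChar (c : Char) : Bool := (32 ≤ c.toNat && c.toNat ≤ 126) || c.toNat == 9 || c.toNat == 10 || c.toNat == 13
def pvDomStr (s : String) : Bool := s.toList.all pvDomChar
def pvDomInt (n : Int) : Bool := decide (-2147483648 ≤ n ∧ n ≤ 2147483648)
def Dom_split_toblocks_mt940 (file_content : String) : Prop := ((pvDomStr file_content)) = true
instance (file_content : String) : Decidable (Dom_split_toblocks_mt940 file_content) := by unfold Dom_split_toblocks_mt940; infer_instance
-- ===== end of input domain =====

-- B rewrites A's single accumulator loop as a two-level segment scan (find each
-- ':'-segment, filter and join it); same cost, alternative decomposition.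


-- ===== PORT A =====
-- one step of A's for-loop over lines: state = (blocks, current_block)
def pvStepA (st : List String × List String) (line : String) : List String × List String :=
  if PySem.Str.startswith line ":" then
    (if st.2 = [] then st.1 else st.1 ++ [PySem.Str.join "" st.2], [line])
  else if PySem.Str.strip line ≠ "" then (st.1, st.2 ++ [line])
  else st

def split_toblocks_mt940 (file_content : String) : List String :=
  let lines := (PySem.Str.split? file_content "\n").getD []   -- sep "\n" ≠ "": split? is always some
  let st := lines.foldl pvStepA ([], [])
  if st.2 = [] then st.1 else st.1 ++ [PySem.Str.join "" st.2]

-- ===== PORT B =====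
def pvNC (l : String) : Bool := !(PySem.Str.startswith l ":")
def pvKeep (l : String) : Bool := PySem.Str.startswith l ":" || !(PySem.Str.strip l == "")

-- Source B's outer while-loop: each iteration consumes one segment lines[i:j]
-- (the inner `while j < n and not startswith` is the takeWhile/dropWhile split of the rest)
def pvGoB : List String → List String
  | [] => []
  | l :: rest =>
    let kept := (l :: rest.takeWhile pvNC).filter pvKeep
    let tail := pvGoB (rest.dropWhile pvNC)
    if kept = [] then tail else PySem.Str.join "" kept :: tail
termination_by lines => lines.length
decreasing_by
  simp only [List.length_cons]
  exact Nat.lt_succ_of_le (List.length_dropWhile_le _ _)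

def split_toblocks_mt940_alt (file_content : String) : List String :=
  pvGoB ((PySem.Str.split? file_content "\n").getD [])

-- ===== PRECONDITION & SPEC =====
def Spec_split_toblocks_mt940 (file_content : String) (out : List String) : Prop := out = split_toblocks_mt940_alt file_content
instance (file_content : String) (out : List String) : Decidable (Spec_split_toblocks_mt940 file_content out) := by unfold Spec_split_toblocks_mt940; infer_instance

-- ===== CLAIM (what is proved, stated in full; the proofs are below) =====
def Claim_equal_split_toblocks_mt940 : Prop := ∀ (file_content : String), Dom_split_toblocks_mt940 file_content → Spec_split_toblocks_mt940 file_content (split_toblocks_mt940 file_content)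

-- ===== LEMMAS AND PROOFS =====
def pvEmit (c : List String) : List String :=
  if c = [] then [] else [PySem.Str.join "" c]

lemma pvFinish_eq (b c : List String) :
    (if c = [] then b else b ++ [PySem.Str.join "" c]) = b ++ pvEmit c := by
  unfold pvEmit; split_ifs <;> simp

lemma pvKeep_of_colon {l : String} (h : pvNC l = false) : pvKeep l = true := by
  have h2 : PySem.Chars.startswith l.toList [':'] = true := by simpa [pvNC] using h
  simp [pvKeep, h2]

lemma pvGoB_colon (l : String) (rest : List String) (h : pvNC l = false) :
    pvGoB (l :: rest)
      = PySem.Str.join "" (l :: (rest.takeWhile pvNC).filter pvKeep)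
          :: pvGoB (rest.dropWhile pvNC) := by
  rw [pvGoB]
  simp [pvKeep_of_colon h]

lemma pvMain (lines : List String) : ∀ blocks current : List String,
    (let st := lines.foldl pvStepA (blocks, current);
      if st.2 = [] then st.1 else st.1 ++ [PySem.Str.join "" st.2])
    = blocks ++ pvEmit (current ++ (lines.takeWhile pvNC).filter pvKeep)
        ++ pvGoB (lines.dropWhile pvNC) := by
  induction lines with
  | nil => intro blocks current; simp [pvGoB, pvFinish_eq]
  | cons l rest ih =>
    intro blocks current
    by_cases hnc : pvNC l = true
    · have hc : PySem.Chars.startswith l.toList [':'] = false := by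
        simpa [pvNC] using hnc
      rw [List.takeWhile_cons_of_pos hnc, List.dropWhile_cons_of_pos hnc]
      by_cases hs : PySem.Str.strip l = ""
      · -- blank line: dropped by both
        have hk : pvKeep l = false := by simp [pvKeep, hc, hs]
        have hstep : pvStepA (blocks, current) l = (blocks, current) := by
          simp [pvStepA, hc, hs]
        simp only [List.foldl_cons, hstep, List.filter_cons, hk]
        exact ih blocks current
      · -- nonblank line: appended to current / kept in the segment
        have hk : pvKeep l = true := by simp [pvKeep, hs]
        have hstep : pvStepA (blocks, current) l = (blocks, current ++ [l]) := by
          simp [pvStepA, hc, hs]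
        simp only [List.foldl_cons, hstep, List.filter_cons, hk]
        rw [ih]
        simp
    · -- colon line: A flushes current and restarts; B starts a new segment here
      have hnc' : pvNC l = false := by simpa using hnc
      have hc : PySem.Chars.startswith l.toList [':'] = true := by
        simpa [pvNC] using hnc'
      rw [List.takeWhile_cons_of_neg (by simp [hnc']),
          List.dropWhile_cons_of_neg (by simp [hnc'])]
      have hstep : pvStepA (blocks, current) l = (blocks ++ pvEmit current, [l]) := by
        simp [pvStepA, hc, pvFinish_eq]
      simp only [List.foldl_cons, hstep]
      rw [ih, pvGoB_colon l rest hnc']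
      simp [pvEmit]

lemma pvGoB_step (lines : List String) :
    pvGoB lines
      = pvEmit ((lines.takeWhile pvNC).filter pvKeep) ++ pvGoB (lines.dropWhile pvNC) := by
  cases lines with
  | nil => simp [pvGoB, pvEmit]
  | cons l rest =>
    by_cases h : pvNC l = true
    · rw [List.takeWhile_cons_of_pos h, List.dropWhile_cons_of_pos h, pvGoB]
      split_ifs with hk
      · simp [hk, pvEmit]
      · simp [hk, pvEmit]
    · have h' : pvNC l = false := by simpa using h
      rw [List.takeWhile_cons_of_neg (by simp [h']), List.dropWhile_cons_of_neg (by simp [h'])]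
      simp [pvEmit]

-- ===== VERDICT (by name: the statement is the Claim_ definition above) =====
theorem split_toblocks_mt940_spec : Claim_equal_split_toblocks_mt940 := by
  intro fc _
  unfold Spec_split_toblocks_mt940 split_toblocks_mt940 split_toblocks_mt940_alt
  rw [pvMain, pvGoB_step ((PySem.Str.split? fc "\n").getD [])]
  simp
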